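-- pv_equiv track=rewrite | github.com/mohammad-abdollahi/Secure-Chat | Lab/hw2/q2/client.py | messageToStream
-- ===== SOURCE A (Python) =====
-- def messageToStream(data):
--     streams = []
--     while (len(data)>0):
--         if(len(data)>=16):
--             stream = data[:16]
--             data = data[16:]
--         else:
--             stream = data + ("~"*(16-len(data)))
--             data = ''
--         stream_bytes = [ ord(c) for c in stream]
--         streams.append(stream_bytes)
--     return streams
-- ===== SOURCE B (Python) =====
-- def messageToStream(data):
--     pad = (-len(data)) % 16
--     padded = data + "~" * pad
--     return [[ord(c) for c in padded[i:i + 16]] for i in range(0, len(padded), 16)]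
-- ===== Notes on version B (the rewrite author's own statement) =====
-- stated objective: faster
-- what changed: Computes the total padding once with (-len) % 16, appends it up front, and chunks the padded string with a uniform stride-16 range loop over slices, replacing A's while loop that re-binds data = data[16:] (an O(remaining) copy per chunk) and its per-iteration >=16 branch.
import Mathlib
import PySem

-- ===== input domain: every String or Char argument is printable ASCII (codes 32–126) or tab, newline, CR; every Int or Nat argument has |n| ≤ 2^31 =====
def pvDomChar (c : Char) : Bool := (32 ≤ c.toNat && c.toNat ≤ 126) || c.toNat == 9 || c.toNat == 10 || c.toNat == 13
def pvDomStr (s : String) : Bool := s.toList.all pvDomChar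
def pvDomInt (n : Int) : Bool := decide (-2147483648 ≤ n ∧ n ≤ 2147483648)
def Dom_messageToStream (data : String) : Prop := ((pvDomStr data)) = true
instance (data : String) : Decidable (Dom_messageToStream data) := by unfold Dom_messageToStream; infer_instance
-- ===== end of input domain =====

-- B pads the whole string once with (-len) % 16 tildes and then chunks it with a uniform
-- stride-16 range loop, replacing A's while loop that re-copies the remainder each iteration (objective: faster, measured).

-- ===== PORT A =====
-- A's while loop as structural recursion on the remaining characters, accumulator `streams`.
-- data[:16] / data[16:] are List.take 16 / List.drop 16 (exact for these nonnegative bounds: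
-- PySem.List.slice_to_natCast / slice_from_natCast).
def messageToStreamGo (data : List Char) (streams : List (List Int)) : List (List Int) :=
  if 0 < data.length then
    if 16 ≤ data.length then
      messageToStreamGo (data.drop 16)
        (streams ++ [(data.take 16).map (fun c => (c.toNat : Int))])
    else
      streams ++ [((data ++ List.replicate (16 - data.length) '~').map (fun c => (c.toNat : Int)))]
  else streams
termination_by data.length
decreasing_by simp; omega

def messageToStream (data : String) : List (List Int) :=
  messageToStreamGo data.toList []

-- ===== PORT B =====
def messageToStream_alt (data : String) : List (List Int) :=
  let l := data.toList
  let pad := PySem.Int.mod (-(l.length : Int)) 16          -- (-len(data)) % 16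
  let padded := l ++ List.replicate pad.toNat '~'           -- data + "~" * pad
  (PySem.List.pyRange 0 (padded.length : Int) 16).map       -- range(0, len(padded), 16)
    (fun i => (PySem.List.slice padded (some i) (some (i + 16))).map (fun c => (c.toNat : Int)))

-- ===== PRECONDITION & SPEC =====
def Spec_messageToStream (data : String) (out : List (List Int)) : Prop := out = messageToStream_alt data
instance (data : String) (out : List (List Int)) : Decidable (Spec_messageToStream data out) := by unfold Spec_messageToStream; infer_instance

-- ===== CLAIM (what is proved, stated in full; the proofs are below) =====
def Claim_equal_messageToStream : Prop := ∀ (data : String), Dom_messageToStream data → Spec_messageToStream data (messageToStream data)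

-- ===== LEMMAS AND PROOFS =====

-- total padding B adds to a string of length n
def padN (n : Nat) : Nat := (PySem.Int.mod (-(n : Int)) 16).toNat

-- K chunks of 16 read off a padded list, as ord-lists
def chunksOrd (p : List Char) (K : Nat) : List (List Int) :=
  (List.range K).map (fun k => ((p.drop (16 * k)).take 16).map (fun c => (c.toNat : Int)))

-- B's result on the character list l, in chunksOrd form
def altChunks (l : List Char) : List (List Int) :=
  chunksOrd (l ++ List.replicate (padN l.length) '~') ((l.length + padN l.length) / 16)

lemma padN_spec (n : Nat) : padN n = (16 - n % 16) % 16 := by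
  unfold padN
  rw [PySem.Int.mod_eq_emod_of_pos (by norm_num)]
  omega

lemma pyRange_slice_chunks (p : List Char) (h : p.length % 16 = 0) :
    (PySem.List.pyRange 0 (p.length : Int) 16).map
      (fun i => (PySem.List.slice p (some i) (some (i + 16))).map (fun c => (c.toNat : Int)))
      = chunksOrd p (p.length / 16) := by
  rw [PySem.List.pyRange_of_pos 0 (p.length : Int) (by norm_num : (0:Int) < 16)]
  rw [List.map_map]
  have hc : (if (0:Int) < (p.length : Int) then (((p.length : Int) - 0 + 16 - 1) / 16).toNat else 0)
      = p.length / 16 := by split_ifs with h0 <;> omega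
  rw [hc]
  unfold chunksOrd
  refine List.map_congr_left ?_
  intro k _
  have hcast : (0 : Int) + 16 * (k : Int) = ((16 * k : Nat) : Int) := by push_cast; ring
  have hsl : PySem.List.slice p (some ((16 * k : Nat) : Int)) (some (((16 * k : Nat) : Int) + 16))
      = (p.drop (16 * k)).take 16 := by
    have h := PySem.List.slice_natCast_add p (16 * k) 16
    simpa using h
  simp only [Function.comp_apply, hcast, hsl]

lemma chunksOrd_cons (a p : List Char) (ha : a.length = 16) (K : Nat) :
    chunksOrd (a ++ p) (K + 1)
      = a.map (fun c => (c.toNat : Int)) :: chunksOrd p K := by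
  unfold chunksOrd
  rw [List.range_succ_eq_map, List.map_cons, List.map_map]
  congr 1
  · simp [ha]
  · refine List.map_congr_left ?_
    intro k _
    have hd : List.drop (16 * (k + 1)) (a ++ p) = List.drop (16 * k) p := by
      rw [List.drop_append]
      simp [ha, List.drop_of_length_le]
      omega
    simp only [Function.comp_apply, Nat.succ_eq_add_one, hd]

lemma altChunks_nil : altChunks [] = [] := by
  simp [altChunks, padN, chunksOrd, PySem.Int.mod]

lemma altChunks_small (l : List Char) (h0 : 0 < l.length) (h16 : l.length < 16) :
    altChunks l = [((l ++ List.replicate (16 - l.length) '~').map (fun c => (c.toNat : Int)))] := by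
  have hp : padN l.length = 16 - l.length := by rw [padN_spec]; omega
  unfold altChunks
  rw [hp, show (l.length + (16 - l.length)) / 16 = 1 from by omega]
  unfold chunksOrd
  have hlen : (l ++ List.replicate (16 - l.length) '~').length ≤ 16 := by
    simp only [List.length_append, List.length_replicate]; omega
  rw [show List.range 1 = [0] from rfl]
  simp only [List.map_cons, List.map_nil, Nat.mul_zero, List.drop_zero]
  rw [List.take_of_length_le hlen]

lemma altChunks_step (l : List Char) (h16 : 16 ≤ l.length) :
    altChunks l = (l.take 16).map (fun c => (c.toNat : Int)) :: altChunks (l.drop 16) := by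
  have hpad : padN ((l.drop 16).length) = padN l.length := by
    simp only [List.length_drop]
    rw [padN_spec, padN_spec]; omega
  have hK : (l.length + padN l.length) / 16
      = ((l.drop 16).length + padN ((l.drop 16).length)) / 16 + 1 := by
    rw [hpad]; simp only [List.length_drop]
    have := padN_spec l.length
    omega
  have hsplit : l ++ List.replicate (padN l.length) '~'
      = l.take 16 ++ (l.drop 16 ++ List.replicate (padN ((l.drop 16).length)) '~') := by
    rw [hpad, ← List.append_assoc, List.take_append_drop]
  unfold altChunks
  rw [hK, hsplit]
  exact chunksOrd_cons _ _ (by simp; omega) _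

lemma go_eq_aux : ∀ (n : Nat) (l : List Char), l.length ≤ n →
    ∀ streams, messageToStreamGo l streams = streams ++ altChunks l := by
  intro n
  induction n with
  | zero =>
    intro l hl streams
    have hnil : l = [] := List.length_eq_zero_iff.mp (by omega)
    subst hnil
    rw [messageToStreamGo]
    simp [altChunks_nil]
  | succ n ih =>
    intro l hl streams
    rw [messageToStreamGo]
    by_cases h0 : 0 < l.length
    · by_cases h16 : 16 ≤ l.length
      · simp only [h0, h16, if_true]
        rw [ih (l.drop 16) (by simp; omega)]
        rw [altChunks_step l h16, List.append_assoc]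
        rfl
      · simp only [h0, h16, if_true, if_false]
        rw [altChunks_small l h0 (by omega)]
    · have hnil : l = [] := List.length_eq_zero_iff.mp (by omega)
      subst hnil
      rw [messageToStreamGo]
      simp [altChunks_nil]

lemma alt_eq_altChunks (data : String) : messageToStream_alt data = altChunks data.toList := by
  have hmod : (data.toList ++ List.replicate (padN data.toList.length) '~').length % 16 = 0 := by
    simp only [List.length_append, List.length_replicate]
    have := padN_spec data.toList.length
    omega
  have h := pyRange_slice_chunks (data.toList ++ List.replicate (padN data.toList.length) '~') hmod
  have hK : (data.toList ++ List.replicate (padN data.toList.length) '~').length / 16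
      = (data.toList.length + padN data.toList.length) / 16 := by simp
  exact h.trans (by rw [hK]; rfl)

-- ===== VERDICT (by name: the statement is the Claim_ definition above) =====
theorem messageToStream_spec : Claim_equal_messageToStream := by
  intro data _
  unfold Spec_messageToStream
  rw [alt_eq_altChunks]
  unfold messageToStream
  rw [go_eq_aux data.toList.length data.toList le_rfl []]
  rfl
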